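-- pv_equiv track=rewrite | github.com/Bladedrinks/Python_Learning | and_inserter.py | insert_and_in
-- ===== SOURCE A (Python) =====
-- def insert_and_in(list):
--     """Insert the conjunction of " and " into a string (usually between the penultimate item and the last item.
--     For example, we got a list:
--
--                                           factors = [1, 3, 7, 21].
--
--     We want to change it into a string without square brackets outside, like this:
--
--                                                 1, 3, 7 and 21
--     """
--     list_in_str = ""
--     # test case: list = [45, 98, 45]
--     # index:             -3  -2  -1
--     # test case: list = [45]
--     # index:             -1
--
--     for i in range(-len(list), 0):  # Negating len(list), we get the negative index of the first item,
--         # so the range(-len(list), 0) yields a sequence of all negative indices of items in the given list.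
--         # In the test case, for i in [-3, -2, -1]
--         if i == -1:
--             list_in_str += f"{list[i]}"
--         elif i == -2:
--             list_in_str += f"{list[i]} and "
--         else:  # not(i == -1 or i == -2); the index of items is neither -1 nor -2 goes down here.
--             list_in_str += f"{list[i]}, "
--     return list_in_str
-- ===== SOURCE B (Python) =====
-- def insert_and_in(list):
--     parts = [f"{x}" for x in list]
--     if not parts:
--         return ""
--     if len(parts) == 1:
--         return parts[0]
--     return ", ".join(parts[:-1]) + " and " + parts[-1]
-- ===== Notes on version B (the rewrite author's own statement) =====
-- stated objective: idiomatic
-- what changed: Replaces the negative-index loop with per-position if/elif/else branching by a single string-conversion pass followed by a case split on the length: empty -> "", single -> that string, otherwise ", ".join of all but the last plus " and " plus the last.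
import Mathlib
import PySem

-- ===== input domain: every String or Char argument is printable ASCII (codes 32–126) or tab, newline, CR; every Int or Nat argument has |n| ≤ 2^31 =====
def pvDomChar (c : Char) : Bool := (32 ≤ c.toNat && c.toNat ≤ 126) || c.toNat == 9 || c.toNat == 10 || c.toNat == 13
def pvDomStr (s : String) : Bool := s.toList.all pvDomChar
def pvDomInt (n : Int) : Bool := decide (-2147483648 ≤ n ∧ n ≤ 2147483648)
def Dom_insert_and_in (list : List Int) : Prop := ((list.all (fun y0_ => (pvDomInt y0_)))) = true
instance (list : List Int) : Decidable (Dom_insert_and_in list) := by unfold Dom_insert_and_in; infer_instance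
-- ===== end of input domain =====

-- B replaces A's negative-index loop with per-position if/elif branching by one
-- string-conversion pass plus a length case split using join/slice (idiomatic; same O(n) cost).


-- ===== PORT A =====
-- list[i] is ported as pyGetD … 0: every i drawn from range(-len(list), 0) is in range,
-- so the default is never consulted and no IndexError is possible.
def insert_and_in (list : List Int) : String :=
  (PySem.List.pyRange (-(list.length : Int)) 0 1).foldl
    (fun list_in_str i =>
      if i = -1 then list_in_str ++ PySem.Int.toStr (PySem.List.pyGetD list i 0)
      else if i = -2 then list_in_str ++ PySem.Int.toStr (PySem.List.pyGetD list i 0) ++ " and "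
      else list_in_str ++ PySem.Int.toStr (PySem.List.pyGetD list i 0) ++ ", ") ""

-- ===== PORT B =====
def insert_and_in_alt (list : List Int) : String :=
  let parts := list.map (fun x => PySem.Int.toStr x)
  if parts = [] then ""
  else if parts.length = 1 then PySem.List.pyGetD parts 0 ""
  else PySem.Str.join ", " (PySem.List.slice parts none (some (-1))) ++ " and "
         ++ PySem.List.pyGetD parts (-1) ""

-- ===== PRECONDITION & SPEC =====
def Spec_insert_and_in (list : List Int) (out : String) : Prop := out = insert_and_in_alt list
instance (list : List Int) (out : String) : Decidable (Spec_insert_and_in list out) := by unfold Spec_insert_and_in; infer_instance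

-- ===== CLAIM (what is proved, stated in full; the proofs are below) =====
def Claim_equal_insert_and_in : Prop := ∀ (list : List Int), Dom_insert_and_in list → Spec_insert_and_in list (insert_and_in list)

-- ===== LEMMAS AND PROOFS =====

-- The per-index chunk A's loop body appends.
def chunkOf (list : List Int) (i : Int) : String :=
  if i = -1 then PySem.Int.toStr (PySem.List.pyGetD list i 0)
  else if i = -2 then PySem.Int.toStr (PySem.List.pyGetD list i 0) ++ " and "
  else PySem.Int.toStr (PySem.List.pyGetD list i 0) ++ ", "

theorem body_eq (list : List Int) :
    (fun (a : String) i =>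
      if i = -1 then a ++ PySem.Int.toStr (PySem.List.pyGetD list i 0)
      else if i = -2 then a ++ PySem.Int.toStr (PySem.List.pyGetD list i 0) ++ " and "
      else a ++ PySem.Int.toStr (PySem.List.pyGetD list i 0) ++ ", ")
    = fun a i => a ++ chunkOf list i := by
  funext a i
  simp only [chunkOf]
  split_ifs <;> simp [String.append_assoc]

theorem foldl_factor (f : Int → String) (l : List Int) (init : String) :
    l.foldl (fun a i => a ++ f i) init = init ++ l.foldl (fun a i => a ++ f i) "" := by
  induction l generalizing init with
  | nil => simp
  | cons x l ih =>
      simp only [List.foldl_cons]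
      rw [ih (init ++ f x), ih ("" ++ f x)]
      simp [String.append_assoc]

theorem pyGetD_shift (x : Int) (xs : List Int) (i : Int) (d : Int)
    (h1 : -(xs.length : Int) ≤ i) (h2 : i < 0) :
    PySem.List.pyGetD (x :: xs) i d = PySem.List.pyGetD xs i d := by
  obtain ⟨k, hk⟩ : ∃ k : Nat, i = -(k : Int) := ⟨i.natAbs, by omega⟩
  subst hk
  rw [PySem.List.pyGetD_neg_natCast _ k d (by omega) (by simp; omega),
      PySem.List.pyGetD_neg_natCast _ k d (by omega) (by omega)]
  simp only [List.length_cons]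
  rw [List.getElem_cons]
  have hne : ¬ (xs.length + 1 - k = 0) := by omega
  simp only [hne, dif_neg, not_false_iff]
  congr 1
  omega

theorem pyGetD_head (x : Int) (l : List Int) :
    PySem.List.pyGetD (x :: l) (-(((x :: l).length : Nat) : Int)) 0 = x := by
  rw [PySem.List.pyGetD_neg_natCast _ _ _ (by simp) (le_refl _)]
  simp

theorem A_cons (x : Int) (xs : List Int) :
    insert_and_in (x :: xs) = chunkOf (x :: xs) (-((x :: xs).length : Int)) ++ insert_and_in xs := by
  unfold insert_and_in
  rw [body_eq (x :: xs), body_eq xs]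
  rw [PySem.List.pyRange_one_cons (a := -((x :: xs).length : Int)) (by simp; omega)]
  have h1 : -(((x :: xs).length : Nat) : Int) + 1 = -((xs.length : Nat) : Int) := by
    simp only [List.length_cons]; push_cast; ring
  rw [h1, List.foldl_cons]
  rw [PySem.List.foldl_congr_mem _ _ (fun a i => a ++ chunkOf xs i) _
    (by
      intro acc i hi
      rw [PySem.List.mem_pyRange_one] at hi
      have : chunkOf (x :: xs) i = chunkOf xs i := by
        unfold chunkOf
        rw [pyGetD_shift x xs i 0 hi.1 hi.2]
      rw [this])]
  rw [foldl_factor]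
  simp

-- Common recursive characterisation of both ports.
def pvGo : List Int → String
  | [] => ""
  | [x] => PySem.Int.toStr x
  | x :: xs =>
      (if xs.length = 1 then PySem.Int.toStr x ++ " and " else PySem.Int.toStr x ++ ", ")
        ++ pvGo xs

theorem pv_A_eq_go (l : List Int) : insert_and_in l = pvGo l := by
  induction l with
  | nil => decide
  | cons x xs ih =>
      rw [A_cons, ih]
      cases xs with
      | nil =>
          show chunkOf [x] (-1) ++ pvGo [] = pvGo [x]
          unfold chunkOf pvGo
          rw [PySem.List.pyGetD_neg_one _ _ (by simp)]
          simp
      | cons y ys =>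
          have hhead := pyGetD_head x (y :: ys)
          unfold chunkOf
          have h1 : ¬ (-(((x :: y :: ys).length : Nat) : Int) = -1) := by simp; omega
          have h2 : (-(((x :: y :: ys).length : Nat) : Int) = -2) ↔ ys = [] := by
            rw [← List.length_eq_zero_iff]
            simp only [List.length_cons]
            omega
          by_cases hys : ys = []
          · subst hys
            rw [if_neg h1, if_pos (h2.mpr rfl)]
            rw [hhead]
            simp [pvGo]
          · obtain ⟨z, zs, rfl⟩ := List.exists_cons_of_ne_nil hys
            rw [if_neg h1, if_neg (by rw [h2]; simp), hhead]
            simp only [pvGo]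
            simp [String.append_assoc]

-- The string-level shape of B's else branch.
def pvGoS : List String → String
  | [] => ""
  | [p] => p
  | p :: ps => (if ps.length = 1 then p ++ " and " else p ++ ", ") ++ pvGoS ps

theorem join_single (sep p : String) : PySem.Str.join sep [p] = p := by
  apply String.ext
  simp [PySem.Str.toList_join, PySem.Chars.join_singleton]

theorem join_cc (sep p q : String) (rest : List String) :
    PySem.Str.join sep (p :: q :: rest) = p ++ sep ++ PySem.Str.join sep (q :: rest) := by
  apply String.ext
  simp [PySem.Str.toList_join, PySem.Chars.join_cons_cons]

theorem pvJoin (rest : List String) : ∀ (p q : String),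
    PySem.Str.join ", " ((p :: q :: rest).dropLast) ++ " and "
        ++ (p :: q :: rest).getLast (by simp)
      = pvGoS (p :: q :: rest) := by
  induction rest with
  | nil =>
      intro p q
      simp [pvGoS, join_single]
  | cons r rs ih =>
      intro p q
      have hdl : (p :: q :: r :: rs).dropLast = p :: q :: (r :: rs).dropLast := by simp
      rw [hdl, join_cc, List.getLast_cons (by simp)]
      have hdl2 : q :: (r :: rs).dropLast = (q :: r :: rs).dropLast := by simp
      rw [hdl2]
      have := ih q r
      rw [show pvGoS (p :: q :: r :: rs)
            = (if (q :: r :: rs).length = 1 then p ++ " and " else p ++ ", ")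
                ++ pvGoS (q :: r :: rs) from by rw [pvGoS] ; simp]
      rw [if_neg (by simp)]
      rw [← this]
      simp [String.append_assoc]

theorem go_goS (l : List Int) : pvGo l = pvGoS (l.map (fun x => PySem.Int.toStr x)) := by
  induction l with
  | nil => rfl
  | cons x xs ih =>
      cases xs with
      | nil => rfl
      | cons y ys =>
          simp only [List.map_cons] at ih ⊢
          rw [pvGo, pvGoS, ih] <;> simp

theorem pv_B_eq_go (l : List Int) : insert_and_in_alt l = pvGo l := by
  unfold insert_and_in_alt
  cases l with
  | nil => rfl
  | cons x xs =>
      cases xs with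
      | nil => simp [pvGo, PySem.List.pyGetD_zero_cons]
      | cons y ys =>
          rw [go_goS]
          simp only [List.map_cons]
          rw [if_neg (by simp), if_neg (by simp)]
          rw [PySem.List.slice_to_neg_one, PySem.List.pyGetD_neg_one _ _ (by simp)]
          exact pvJoin _ _ _

-- ===== VERDICT (by name: the statement is the Claim_ definition above) =====
theorem insert_and_in_spec : Claim_equal_insert_and_in := by
  intro l _
  unfold Spec_insert_and_in
  rw [pv_A_eq_go, pv_B_eq_go]
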